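-- pv_equiv track=rewrite | github.com/RIOUD/AIlawyer | rich_formatter.py | _get_term_category
-- ===== SOURCE A (Python) =====
-- def _get_term_category(term: str) -> str:
--     """Get the category for a legal term."""
--     term_lower = term.lower()
--
--     if any(word in term_lower for word in ['artikel', 'wet', 'wetboek', 'decreet']):
--         return 'Legislation'
--     elif any(word in term_lower for word in ['arrest', 'vonnis', 'beschikking']):
--         return 'Case Law'
--     elif any(word in term_lower for word in ['werkgever', 'werknemer', 'arbeid']):
--         return 'Employment Law'
--     elif any(word in term_lower for word in ['huur', 'eigendom', 'bezit']):
--         return 'Property Law'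
--     elif any(word in term_lower for word in ['schade', 'onrechtmatig']):
--         return 'Tort Law'
--     elif any(word in term_lower for word in ['erf', 'testament']):
--         return 'Inheritance Law'
--     else:
--         return 'General'
-- ===== SOURCE B (Python) =====
-- CATEGORY_NAMES = ['Legislation', 'Case Law', 'Employment Law', 'Property Law',
--                   'Tort Law', 'Inheritance Law', 'General']
--
-- # keyword -> priority (index into CATEGORY_NAMES); lower priority wins
-- KEYWORD_PRIORITY = {
--     'artikel': 0, 'wet': 0, 'wetboek': 0, 'decreet': 0,
--     'arrest': 1, 'vonnis': 1, 'beschikking': 1,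
--     'werkgever': 2, 'werknemer': 2, 'arbeid': 2,
--     'huur': 3, 'eigendom': 3, 'bezit': 3,
--     'schade': 4, 'onrechtmatig': 4,
--     'erf': 5, 'testament': 5,
-- }
--
-- def _get_term_category(term: str) -> str:
--     """Get the category for a legal term.
--
--     Single left-to-right scan of the lowered term: at each position, check
--     which keywords start there and keep the best (lowest) priority seen.
--     """
--     t = term.lower()
--     best = 6  # 'General'
--     for i in range(len(t)):
--         for kw, pri in KEYWORD_PRIORITY.items():
--             if pri < best and t.startswith(kw, i):
--                 best = pri
--     return CATEGORY_NAMES[best]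
-- ===== Notes on version B (the rewrite author's own statement) =====
-- stated objective: alternative
-- what changed: Instead of running a separate substring search per keyword in an if/elif chain, B scans the lowered term left-to-right once and at each position checks which keywords start there, keeping the minimum category priority; the answer is the category of the best priority found.
import Mathlib
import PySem

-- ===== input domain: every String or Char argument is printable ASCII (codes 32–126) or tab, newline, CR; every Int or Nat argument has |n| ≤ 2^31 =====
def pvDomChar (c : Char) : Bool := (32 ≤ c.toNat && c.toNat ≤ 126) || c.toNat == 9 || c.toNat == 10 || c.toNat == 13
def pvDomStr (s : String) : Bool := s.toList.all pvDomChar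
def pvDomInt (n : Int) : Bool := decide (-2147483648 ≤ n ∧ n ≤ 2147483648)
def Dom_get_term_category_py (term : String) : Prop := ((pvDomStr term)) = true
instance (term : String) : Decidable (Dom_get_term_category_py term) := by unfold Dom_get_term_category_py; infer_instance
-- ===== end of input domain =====

-- B replaces A's keyword-by-keyword if/elif of substring searches with a single left-to-right
-- scan of the lowered term that keeps the minimum matching category priority (objective: alternative).


-- ===== PORT A =====
def get_term_category_py (term : String) : String :=
  let term_lower := PySem.Str.lower term
  if ["artikel", "wet", "wetboek", "decreet"].any (fun w => PySem.Str.isIn w term_lower) then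
    "Legislation"
  else if ["arrest", "vonnis", "beschikking"].any (fun w => PySem.Str.isIn w term_lower) then
    "Case Law"
  else if ["werkgever", "werknemer", "arbeid"].any (fun w => PySem.Str.isIn w term_lower) then
    "Employment Law"
  else if ["huur", "eigendom", "bezit"].any (fun w => PySem.Str.isIn w term_lower) then
    "Property Law"
  else if ["schade", "onrechtmatig"].any (fun w => PySem.Str.isIn w term_lower) then
    "Tort Law"
  else if ["erf", "testament"].any (fun w => PySem.Str.isIn w term_lower) then
    "Inheritance Law"
  else
    "General"

-- ===== PORT B =====
def pvNames : List String :=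
  ["Legislation", "Case Law", "Employment Law", "Property Law", "Tort Law", "Inheritance Law", "General"]

-- keyword -> priority, in Source B's dict insertion order
def pvKeywords : List (List Char × Nat) :=
  [ ("artikel".toList, 0), ("wet".toList, 0), ("wetboek".toList, 0), ("decreet".toList, 0),
    ("arrest".toList, 1), ("vonnis".toList, 1), ("beschikking".toList, 1),
    ("werkgever".toList, 2), ("werknemer".toList, 2), ("arbeid".toList, 2),
    ("huur".toList, 3), ("eigendom".toList, 3), ("bezit".toList, 3),
    ("schade".toList, 4), ("onrechtmatig".toList, 4),
    ("erf".toList, 5), ("testament".toList, 5) ]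

-- inner loop: t.startswith(kw, i) on the current suffix
def pvBestAt (s : List Char) (best : Nat) : Nat :=
  pvKeywords.foldl (fun b p => if p.2 < b ∧ PySem.Chars.startswith s p.1 then p.2 else b) best

-- outer loop over i in range(len(t)): walk the suffixes
def pvScan : List Char → Nat → Nat
  | [], best => best
  | c :: rest, best => pvScan rest (pvBestAt (c :: rest) best)

def get_term_category_py_alt (term : String) : String :=
  pvNames.getD (pvScan (PySem.Str.lower term).toList 6) "General"

-- ===== PRECONDITION & SPEC =====
def Spec_get_term_category_py (term : String) (out : String) : Prop := out = get_term_category_py_alt term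
instance (term : String) (out : String) : Decidable (Spec_get_term_category_py term out) := by unfold Spec_get_term_category_py; infer_instance

-- ===== CLAIM (what is proved, stated in full; the proofs are below) =====
def Claim_equal_get_term_category_py : Prop := ∀ (term : String), Dom_get_term_category_py term → Spec_get_term_category_py term (get_term_category_py term)

-- ===== LEMMAS AND PROOFS =====

-- fold of min over the priorities of the entries satisfying c
def pvMfold (L : List (List Char × Nat)) (c : List Char × Nat → Bool) (b : Nat) : Nat :=
  L.foldl (fun acc p => if c p then min acc p.2 else acc) b

theorem pvMfold_le_init (L : List (List Char × Nat)) (c : List Char × Nat → Bool) (b : Nat) :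
    pvMfold L c b ≤ b := by
  induction L generalizing b with
  | nil => simp [pvMfold]
  | cons p L ih =>
    simp only [pvMfold, List.foldl]
    split
    · exact le_trans (ih (min b p.2)) (Nat.min_le_left _ _)
    · exact ih b

theorem pvMfold_le_of_mem (L : List (List Char × Nat)) (c : List Char × Nat → Bool) (b : Nat)
    (p : List Char × Nat) (hp : p ∈ L) (hc : c p = true) : pvMfold L c b ≤ p.2 := by
  induction L generalizing b with
  | nil => cases hp
  | cons q L ih =>
    simp only [pvMfold, List.foldl]
    rcases List.mem_cons.mp hp with h | h
    · subst h
      rw [hc]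
      exact le_trans (pvMfold_le_init L c _) (Nat.min_le_right _ _)
    · split
      · exact ih _ h
      · exact ih _ h

theorem pvMfold_cons (q : List Char × Nat) (L : List (List Char × Nat))
    (c : List Char × Nat → Bool) (b : Nat) :
    pvMfold (q :: L) c b = pvMfold L c (if c q then min b q.2 else b) := rfl

theorem pvMfold_attained (L : List (List Char × Nat)) (c : List Char × Nat → Bool) (b : Nat) :
    pvMfold L c b = b ∨ ∃ p ∈ L, c p = true ∧ pvMfold L c b = p.2 := by
  induction L generalizing b with
  | nil => left; simp [pvMfold]
  | cons q L ih =>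
    rw [pvMfold_cons]
    by_cases hq : c q = true
    · rw [if_pos hq]
      rcases ih (min b q.2) with h | ⟨p, hp, hc, hv⟩
      · rcases Nat.le_total b q.2 with hle | hle
        · left; rw [h]; omega
        · right; exact ⟨q, List.mem_cons_self .., hq, by rw [h]; omega⟩
      · right; exact ⟨p, List.mem_cons_of_mem _ hp, hc, hv⟩
    · rw [if_neg hq]
      rcases ih b with h | ⟨p, hp, hc, hv⟩
      · left; exact h
      · right; exact ⟨p, List.mem_cons_of_mem _ hp, hc, hv⟩

theorem pvMfold_all_false (L : List (List Char × Nat)) (c : List Char × Nat → Bool) (b : Nat)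
    (h : ∀ p ∈ L, c p = false) : pvMfold L c b = b := by
  induction L generalizing b with
  | nil => simp [pvMfold]
  | cons q L ih =>
    simp only [pvMfold, List.foldl]
    rw [if_neg (by simp [h q (List.mem_cons_self ..)])]
    exact ih b (fun p hp => h p (List.mem_cons_of_mem _ hp))

-- the inner loop is the min-fold over the startswith condition
theorem pvBfold_eq_mfold (L : List (List Char × Nat)) (c : List Char × Nat → Bool) (b : Nat) :
    L.foldl (fun b p => if p.2 < b ∧ c p then p.2 else b) b = pvMfold L c b := by
  induction L generalizing b with
  | nil => simp [pvMfold]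
  | cons q L ih =>
    simp only [pvMfold, List.foldl] at *
    by_cases hq : c q = true
    · by_cases hlt : q.2 < b
      · rw [if_pos ⟨hlt, hq⟩, if_pos hq, Nat.min_eq_right (le_of_lt hlt)]
        exact ih _
      · rw [if_neg (by tauto), if_pos hq, Nat.min_eq_left (by omega)]
        exact ih _
    · rw [if_neg (by tauto), if_neg hq]
      exact ih _

theorem pvBestAt_eq (s : List Char) (b : Nat) :
    pvBestAt s b = pvMfold pvKeywords (fun p => PySem.Chars.startswith s p.1) b :=
  pvBfold_eq_mfold _ _ _

-- combining two min-folds whose conditions OR to c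
theorem pvMfold_combine (L : List (List Char × Nat)) (c c1 c2 : List Char × Nat → Bool)
    (hc : ∀ p ∈ L, c p = (c1 p || c2 p)) (b : Nat) :
    pvMfold L c2 (pvMfold L c1 b) = pvMfold L c b := by
  apply Nat.le_antisymm
  · rcases pvMfold_attained L c b with h | ⟨p, hp, hcp, hv⟩
    · rw [h]
      exact le_trans (pvMfold_le_init _ _ _) (pvMfold_le_init _ _ _)
    · rw [hv]
      rw [hc p hp] at hcp
      rcases Bool.or_eq_true_iff.mp hcp with h1 | h2
      · exact le_trans (pvMfold_le_init _ _ _) (pvMfold_le_of_mem _ _ _ p hp h1)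
      · exact pvMfold_le_of_mem _ _ _ p hp h2
  · rcases pvMfold_attained L c2 (pvMfold L c1 b) with h | ⟨p, hp, hcp, hv⟩
    · rw [h]
      rcases pvMfold_attained L c1 b with h' | ⟨p, hp, hcp, hv⟩
      · rw [h']; exact pvMfold_le_init _ _ _
      · rw [hv]
        exact pvMfold_le_of_mem _ _ _ p hp (by rw [hc p hp, hcp]; simp)
    · rw [hv]
      exact pvMfold_le_of_mem _ _ _ p hp (by rw [hc p hp, hcp]; simp)

-- the scan computes the min-fold over the substring condition
theorem pvScan_eq (s : List Char) (b : Nat) :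
    pvScan s b = pvMfold pvKeywords (fun p => PySem.Chars.isIn p.1 s) b := by
  induction s generalizing b with
  | nil =>
    rw [pvScan, pvMfold_all_false]
    decide
  | cons c rest ih =>
    rw [pvScan, ih, pvBestAt_eq]
    apply pvMfold_combine
    intro p _
    rcases h : PySem.Chars.isIn p.1 (c :: rest) with _ | _
    · have := (PySem.Chars.isIn_eq_false_iff _ _).mp h
      rw [List.infix_cons_iff, not_or] at this
      simp [(PySem.Chars.isIn_eq_false_iff _ _).mpr this.2,
        Bool.eq_false_iff.mpr (fun hh => this.1 ((PySem.Chars.startswith_iff _ _).mp hh))]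
    · have := (PySem.Chars.isIn_iff_infix _ _).mp h
      rw [List.infix_cons_iff] at this
      rcases this with h1 | h2
      · simp [(PySem.Chars.startswith_iff _ _).mpr h1]
      · simp [(PySem.Chars.isIn_iff_infix _ _).mpr h2]

-- the min-fold value is i exactly when a priority-i keyword matches and no earlier one does
theorem pvV_eq (t : List Char) (i : Nat) (hi : i ≤ 6)
    (hup : ∃ p ∈ pvKeywords, p.2 = i ∧ PySem.Chars.isIn p.1 t = true)
    (hlow : ∀ p ∈ pvKeywords, p.2 < i → PySem.Chars.isIn p.1 t = false) :
    pvMfold pvKeywords (fun p => PySem.Chars.isIn p.1 t) 6 = i := by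
  rcases hup with ⟨p0, hp0, hpri, hin⟩
  have hle : pvMfold pvKeywords (fun p => PySem.Chars.isIn p.1 t) 6 ≤ i := by
    rw [← hpri]; exact pvMfold_le_of_mem _ _ _ p0 hp0 hin
  have hge : i ≤ pvMfold pvKeywords (fun p => PySem.Chars.isIn p.1 t) 6 := by
    rcases pvMfold_attained pvKeywords (fun p => PySem.Chars.isIn p.1 t) 6 with h | ⟨p, hp, hcp, hv⟩
    · omega
    · rw [hv]
      by_contra hlt
      have := hlow p hp (by omega)
      simp [this] at hcp
  omega

-- ===== VERDICT (by name: the statement is the Claim_ definition above) =====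
theorem get_term_category_py_spec : Claim_equal_get_term_category_py := by
  intro term _
  unfold Spec_get_term_category_py get_term_category_py get_term_category_py_alt
  rw [pvScan_eq]
  simp only [List.any_cons, List.any_nil, PySem.Str.isIn_eq, PySem.Str.toList_lower,
    Bool.or_false]
  set t := PySem.Chars.lower term.toList with ht
  by_cases h1 : (PySem.Chars.isIn "artikel".toList t || (PySem.Chars.isIn "wet".toList t || (PySem.Chars.isIn "wetboek".toList t || (PySem.Chars.isIn "decreet".toList t)))) = true
  · rw [if_pos h1, pvV_eq t 0 (by omega) ?_ ?_]
    · rfl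
    · simp only [Bool.or_eq_true] at h1
      rcases h1 with h | h | h | h
      exacts [⟨("artikel".toList, 0), by decide, rfl, h⟩, ⟨("wet".toList, 0), by decide, rfl, h⟩, ⟨("wetboek".toList, 0), by decide, rfl, h⟩, ⟨("decreet".toList, 0), by decide, rfl, h⟩]
    · intro p hp hpi
      omega
  · rw [if_neg h1]
    by_cases h2 : (PySem.Chars.isIn "arrest".toList t || (PySem.Chars.isIn "vonnis".toList t || (PySem.Chars.isIn "beschikking".toList t))) = true
    · rw [if_pos h2, pvV_eq t 1 (by omega) ?_ ?_]
      · rfl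
      · simp only [Bool.or_eq_true] at h2
        rcases h2 with h | h | h
        exacts [⟨("arrest".toList, 1), by decide, rfl, h⟩, ⟨("vonnis".toList, 1), by decide, rfl, h⟩, ⟨("beschikking".toList, 1), by decide, rfl, h⟩]
      · simp only [Bool.or_eq_true, not_or, Bool.not_eq_true] at *
        intro p hp hpi
        fin_cases hp <;> simp_all
    · rw [if_neg h2]
      by_cases h3 : (PySem.Chars.isIn "werkgever".toList t || (PySem.Chars.isIn "werknemer".toList t || (PySem.Chars.isIn "arbeid".toList t))) = true
      · rw [if_pos h3, pvV_eq t 2 (by omega) ?_ ?_]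
        · rfl
        · simp only [Bool.or_eq_true] at h3
          rcases h3 with h | h | h
          exacts [⟨("werkgever".toList, 2), by decide, rfl, h⟩, ⟨("werknemer".toList, 2), by decide, rfl, h⟩, ⟨("arbeid".toList, 2), by decide, rfl, h⟩]
        · simp only [Bool.or_eq_true, not_or, Bool.not_eq_true] at *
          intro p hp hpi
          fin_cases hp <;> simp_all
      · rw [if_neg h3]
        by_cases h4 : (PySem.Chars.isIn "huur".toList t || (PySem.Chars.isIn "eigendom".toList t || (PySem.Chars.isIn "bezit".toList t))) = true
        · rw [if_pos h4, pvV_eq t 3 (by omega) ?_ ?_]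
          · rfl
          · simp only [Bool.or_eq_true] at h4
            rcases h4 with h | h | h
            exacts [⟨("huur".toList, 3), by decide, rfl, h⟩, ⟨("eigendom".toList, 3), by decide, rfl, h⟩, ⟨("bezit".toList, 3), by decide, rfl, h⟩]
          · simp only [Bool.or_eq_true, not_or, Bool.not_eq_true] at *
            intro p hp hpi
            fin_cases hp <;> simp_all
        · rw [if_neg h4]
          by_cases h5 : (PySem.Chars.isIn "schade".toList t || (PySem.Chars.isIn "onrechtmatig".toList t)) = true
          · rw [if_pos h5, pvV_eq t 4 (by omega) ?_ ?_]
            · rfl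
            · simp only [Bool.or_eq_true] at h5
              rcases h5 with h | h
              exacts [⟨("schade".toList, 4), by decide, rfl, h⟩, ⟨("onrechtmatig".toList, 4), by decide, rfl, h⟩]
            · simp only [Bool.or_eq_true, not_or, Bool.not_eq_true] at *
              intro p hp hpi
              fin_cases hp <;> simp_all
          · rw [if_neg h5]
            by_cases h6 : (PySem.Chars.isIn "erf".toList t || (PySem.Chars.isIn "testament".toList t)) = true
            · rw [if_pos h6, pvV_eq t 5 (by omega) ?_ ?_]
              · rfl
              · simp only [Bool.or_eq_true] at h6
                rcases h6 with h | h
                exacts [⟨("erf".toList, 5), by decide, rfl, h⟩, ⟨("testament".toList, 5), by decide, rfl, h⟩]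
              · simp only [Bool.or_eq_true, not_or, Bool.not_eq_true] at *
                intro p hp hpi
                fin_cases hp <;> simp_all
            · rw [if_neg h6]
              rw [pvMfold_all_false]
              · rfl
              · simp only [Bool.or_eq_true, not_or, Bool.not_eq_true] at *
                intro p hp
                fin_cases hp <;> simp_all
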